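-- pv_equiv track=rewrite | github.com/mikalooloo/CptS315-HW1 | src/prod_reco.py | check_combo
-- ===== SOURCE A (Python) =====
-- def get_combo(line, c):
-- 	if c == 0:
-- 		return [[]]
-- 	combos = []
-- 	for i in range(0, len(line)):
-- 		start = line[i]
-- 		rest = line[i + 1:]
-- 		for ret in get_combo(rest, c - 1):
-- 			combos.append([start] + ret)
-- 	return combos
--
-- def check_combo(combo, freq_list):
-- 	if len(combo) != len(set(combo)):
-- 		return False  # this means there's duplicates in the combo
-- 	count = 0
-- 	check_list = get_combo(combo, len(combo) - 1)
-- 	for check in check_list: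
-- 		check = tuple(check)
-- 		if check in freq_list:
-- 			count += 1
-- 	if count == len(combo):
-- 		return True
-- 	return False
-- ===== SOURCE B (Python) =====
-- def check_combo(combo, freq_list):
-- 	if len(combo) != len(set(combo)):
-- 		return False  # duplicates in the combo
-- 	# every leave-one-out subset of a combo is one of the n slices combo[:i]+combo[i+1:]
-- 	return all(tuple(combo[:i] + combo[i + 1:]) in freq_list for i in range(len(combo)))
-- ===== Notes on version B (the rewrite author's own statement) =====
-- stated objective: simpler
-- what changed: Replaced the recursive combination generator plus a membership-counting loop by a direct 'all' over the n leave-one-out slices combo[:i]+combo[i+1:].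
import Mathlib
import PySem

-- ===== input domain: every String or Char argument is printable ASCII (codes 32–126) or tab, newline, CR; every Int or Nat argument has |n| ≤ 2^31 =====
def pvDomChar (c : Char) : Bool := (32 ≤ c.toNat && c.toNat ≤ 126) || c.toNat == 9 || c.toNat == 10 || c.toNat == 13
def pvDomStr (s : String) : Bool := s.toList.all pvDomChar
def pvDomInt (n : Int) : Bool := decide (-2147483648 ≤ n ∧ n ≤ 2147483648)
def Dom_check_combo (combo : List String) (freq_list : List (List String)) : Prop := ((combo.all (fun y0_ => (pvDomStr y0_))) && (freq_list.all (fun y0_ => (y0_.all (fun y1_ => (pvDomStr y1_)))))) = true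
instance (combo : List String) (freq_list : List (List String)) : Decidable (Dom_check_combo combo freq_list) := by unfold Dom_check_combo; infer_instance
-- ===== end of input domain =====

-- B replaces A's recursive combination generator by the n leave-one-out slices, checked with `all` (objective: simpler).

-- ===== PORT A =====
-- Python: get_combo(line, c); the `for i in range(len(line))` loop is transcribed as the
-- structural recursion on line: iteration i=0 is the map over the recursive call, and the
-- remaining iterations i=1.. are exactly the same loop run on the tail with the same c.
def get_combo (line : List String) (c : Int) : List (List String) :=
  if c = 0 then [[]]
  else
    match line with
    | [] => []
    | x :: xs => ((get_combo xs (c - 1)).map (fun ret => x :: ret)) ++ get_combo xs c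

def check_combo (combo : List String) (freq_list : List (List String)) : Bool :=
  if combo.length ≠ (PySem.Set.ofList combo).length then false
  else
    let check_list := get_combo combo ((combo.length : Int) - 1)
    let count := check_list.foldl (fun count check => if freq_list.contains check then count + 1 else count) (0 : Nat)
    count == combo.length

-- ===== PORT B =====
def check_combo_alt (combo : List String) (freq_list : List (List String)) : Bool :=
  if combo.length ≠ (PySem.Set.ofList combo).length then false
  else
    (List.range combo.length).all (fun i => freq_list.contains (combo.take i ++ combo.drop (i + 1)))

-- ===== PRECONDITION & SPEC =====
def Spec_check_combo (combo : List String) (freq_list : List (List String)) (out : Bool) : Prop := out = check_combo_alt combo freq_list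
instance (combo : List String) (freq_list : List (List String)) (out : Bool) : Decidable (Spec_check_combo combo freq_list out) := by unfold Spec_check_combo; infer_instance

-- ===== CLAIM (what is proved, stated in full; the proofs are below) =====
def Claim_equal_check_combo : Prop := ∀ (combo : List String) (freq_list : List (List String)), Dom_check_combo combo freq_list → Spec_check_combo combo freq_list (check_combo combo freq_list)

-- ===== LEMMAS AND PROOFS =====

-- combinations of size larger than the list: none
theorem get_combo_big (line : List String) (c : Int) (h : (line.length : Int) < c) :
    get_combo line c = [] := by
  induction line generalizing c with
  | nil =>
    unfold get_combo
    simp at h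
    rw [if_neg (by omega)]
  | cons x xs ih =>
    unfold get_combo
    rw [if_neg (by simp at h; omega)]
    simp only []
    rw [ih (c - 1) (by simp at h ⊢; omega), ih c (by simp at h ⊢; omega)]
    simp

-- combinations of full size: the list itself
theorem get_combo_full (line : List String) :
    get_combo line (line.length : Int) = [line] := by
  induction line with
  | nil => unfold get_combo; simp
  | cons x xs ih =>
    unfold get_combo
    rw [if_neg (by simp; omega)]
    simp only [List.length_cons]
    have h1 : ((xs.length + 1 : Nat) : Int) - 1 = (xs.length : Int) := by push_cast; ring
    rw [h1, ih, get_combo_big xs ((xs.length + 1 : Nat) : Int) (by push_cast; omega)]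
    simp

-- the size-(n-1) combinations are the leave-one-out slices, back to front
theorem get_combo_pred (line : List String) :
    get_combo line ((line.length : Int) - 1)
      = ((List.range line.length).map (fun i => line.take i ++ line.drop (i + 1))).reverse := by
  induction line with
  | nil => unfold get_combo; rw [if_neg (by simp)]; simp
  | cons x xs ih =>
    cases xs with
    | nil => unfold get_combo; simp
    | cons y ys =>
      unfold get_combo
      rw [if_neg (by simp; omega)]
      simp only [List.length_cons]
      have h1 : ((ys.length + 1 + 1 : Nat) : Int) - 1 - 1 = ((y :: ys).length : Int) - 1 := by
        simp
      have h2 : ((ys.length + 1 + 1 : Nat) : Int) - 1 = ((y :: ys).length : Int) := by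
        simp
      rw [h1, h2, ih, get_combo_full]
      rw [List.range_succ_eq_map]
      simp [List.map_reverse, Function.comp]

-- A's membership-counting loop is the length of the filtered list
theorem foldl_count (freq_list : List (List String)) (l : List (List String)) (n : Nat) :
    l.foldl (fun count check => if freq_list.contains check then count + 1 else count) n
      = n + (l.filter (fun check => freq_list.contains check)).length := by
  induction l generalizing n with
  | nil => simp
  | cons x xs ih =>
    simp only [List.foldl_cons, List.filter_cons]
    by_cases h : freq_list.contains x
    · rw [if_pos h, if_pos h, ih]; simp; omega
    · simp only [h]; rw [ih]; simp

-- ===== VERDICT (by name: the statement is the Claim_ definition above) =====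
theorem check_combo_spec : Claim_equal_check_combo := by
  intro combo freq_list _
  unfold Spec_check_combo check_combo check_combo_alt
  by_cases hdup : combo.length ≠ (PySem.Set.ofList combo).length
  · rw [if_pos hdup, if_pos hdup]
  · rw [if_neg hdup, if_neg hdup]
    simp only [get_combo_pred, foldl_count, Nat.zero_add]
    rw [List.filter_reverse, List.length_reverse, List.filter_map, List.length_map]
    rw [Bool.eq_iff_iff, beq_iff_eq, List.all_eq_true]
    simpa [List.length_range] using
      List.length_filter_eq_length_iff
        (p := fun i => freq_list.contains (combo.take i ++ combo.drop (i + 1)))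
        (l := List.range combo.length)
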